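-- pv_equiv track=rewrite | github.com/moasifk/ds-algos | section-4/problems.py | matching_elements_2
-- ===== SOURCE A (Python) =====
-- def matching_elements_2(list1: list[str], list2: list[str]) -> bool:
--     items_map = {}
--     for i in range(len(list1)):
--         items_map[list1[i]] = True
--
--     for i in range(len(list2)):
--         if items_map.get(list2[i]):
--             return True
--     return False
-- ===== SOURCE B (Python) =====
-- def matching_elements_2(list1: list[str], list2: list[str]) -> bool:
--     a = sorted(list1)
--     b = sorted(list2)
--     i = j = 0
--     while i < len(a) and j < len(b):
--         if a[i] == b[j]:
--             return True
--         if a[i] < b[j]: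
--             i += 1
--         else:
--             j += 1
--     return False
-- ===== Notes on version B (the rewrite author's own statement) =====
-- stated objective: alternative
-- what changed: Replaced hashing (dict of flags plus a probing loop) by a sort-then-merge algorithm: sort both lists and walk them with two pointers, advancing the pointer at the smaller head until a match or exhaustion.
import Mathlib
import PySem

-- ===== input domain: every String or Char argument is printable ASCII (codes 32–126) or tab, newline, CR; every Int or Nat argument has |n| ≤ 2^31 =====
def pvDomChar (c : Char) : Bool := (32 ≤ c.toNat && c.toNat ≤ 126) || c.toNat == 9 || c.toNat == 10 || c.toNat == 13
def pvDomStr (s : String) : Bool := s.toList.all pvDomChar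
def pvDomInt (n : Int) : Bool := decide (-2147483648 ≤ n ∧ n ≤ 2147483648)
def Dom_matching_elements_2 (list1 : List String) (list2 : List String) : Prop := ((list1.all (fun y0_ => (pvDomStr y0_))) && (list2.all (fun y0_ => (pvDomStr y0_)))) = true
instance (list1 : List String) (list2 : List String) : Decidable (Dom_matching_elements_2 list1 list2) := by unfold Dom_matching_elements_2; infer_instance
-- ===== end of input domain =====

-- B replaces A's hash-style dict build + probe loop by sort-then-merge: sort both
-- lists and walk them with two pointers (alternative algorithm, not claimed faster).

-- ===== PORT A =====
-- second loop of A: 'for i in range(len(list2)): if items_map.get(list2[i]): return True' then 'return False'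
def pvScanA (items_map : PySem.Dict String Bool) (list2 : List String) (idxs : List Int) : Bool :=
  match idxs with
  | [] => false
  | i :: rest =>
      if items_map.getD (PySem.List.pyGetD list2 i "") false then true
      else pvScanA items_map list2 rest

def matching_elements_2 (list1 : List String) (list2 : List String) : Bool :=
  let items_map : PySem.Dict String Bool :=
    (PySem.List.pyRange 0 (list1.length : Int) 1).foldl
      (fun d i => d.insert (PySem.List.pyGetD list1 i "") true) PySem.Dict.empty
  pvScanA items_map list2 (PySem.List.pyRange 0 (list2.length : Int) 1)

-- ===== PORT B =====
-- Source B's while loop: two pointers over the sorted lists, advancing past the smaller head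
def pvMergeB (a b : List String) : Bool :=
  match a, b with
  | [], _ => false
  | _, [] => false
  | x :: xs, y :: ys =>
      if x = y then true
      else if x < y then pvMergeB xs (y :: ys)
      else pvMergeB (x :: xs) ys
termination_by a.length + b.length

def matching_elements_2_alt (list1 : List String) (list2 : List String) : Bool :=
  pvMergeB (PySem.List.sorted list1 (fun x => x) false) (PySem.List.sorted list2 (fun x => x) false)

-- ===== PRECONDITION & SPEC =====
def Spec_matching_elements_2 (list1 : List String) (list2 : List String) (out : Bool) : Prop := out = matching_elements_2_alt list1 list2
instance (list1 : List String) (list2 : List String) (out : Bool) : Decidable (Spec_matching_elements_2 list1 list2 out) := by unfold Spec_matching_elements_2; infer_instance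

-- ===== CLAIM =====
def Claim_equal_matching_elements_2 : Prop := ∀ (list1 : List String) (list2 : List String), Dom_matching_elements_2 list1 list2 → Spec_matching_elements_2 list1 list2 (matching_elements_2 list1 list2)

-- ===== LEMMAS AND PROOFS =====

-- the dict built by A's first loop holds key k iff k ∈ list1
theorem pv_getD_foldl_insert (l : List String) (d0 : PySem.Dict String Bool) (k : String) :
    (l.foldl (fun d x => d.insert x true) d0).getD k false
      = (d0.getD k false || l.contains k) := by
  induction l generalizing d0 with
  | nil => simp
  | cons x xs ih =>
      simp only [List.foldl_cons, ih, PySem.Dict.getD_insert]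
      by_cases h : k = x <;> simp [h]

theorem pv_scan_eq_any (d : PySem.Dict String Bool) (l2 : List String) (idxs : List Int) :
    pvScanA d l2 idxs = idxs.any (fun i => d.getD (PySem.List.pyGetD l2 i "") false) := by
  induction idxs with
  | nil => rfl
  | cons i rest ih =>
      simp only [pvScanA, List.any_cons, ih]
      by_cases h : d.getD (PySem.List.pyGetD l2 i "") false <;> simp [h]

theorem pv_A_iff (l1 l2 : List String) :
    matching_elements_2 l1 l2 = true ↔ ∃ x, x ∈ l2 ∧ x ∈ l1 := by
  unfold matching_elements_2
  rw [PySem.List.foldl_pyRange_pyGetD' (a := 0) (xs := l1)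
        (f := fun d x => PySem.Dict.insert d x true) (d := "")
        (init := PySem.Dict.empty) (by norm_num)]
  rw [pv_scan_eq_any, PySem.List.pyRange_one]
  simp only [List.any_map, List.any_eq_true, List.mem_range, Function.comp]
  constructor
  · rintro ⟨k, hk, hget⟩
    rw [show ((0 : Int) + (k : Int)) = (k : Int) by ring] at hget
    rw [PySem.List.pyGetD_natCast, List.getD_eq_getElem l2 "" (by simpa using hk)] at hget
    rw [pv_getD_foldl_insert] at hget
    simp at hget
    exact ⟨l2[k], List.getElem_mem _, hget⟩
  · rintro ⟨x, hx2, hx1⟩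
    obtain ⟨k, hk, rfl⟩ := List.mem_iff_getElem.mp hx2
    refine ⟨k, by simpa using hk, ?_⟩
    rw [show ((0 : Int) + (k : Int)) = (k : Int) by ring,
        PySem.List.pyGetD_natCast, List.getD_eq_getElem l2 "" hk, pv_getD_foldl_insert]
    simp [hx1]

-- the two-pointer merge on sorted lists decides whether the lists intersect
theorem pv_merge_iff (a b : List String)
    (ha : a.Pairwise (· ≤ ·)) (hb : b.Pairwise (· ≤ ·)) :
    pvMergeB a b = true ↔ ∃ x, x ∈ a ∧ x ∈ b := by
  fun_induction pvMergeB a b with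
  | case1 b => simp
  | case2 a h => simp
  | case3 p q r => simp
  | case4 x xs y ys hne hlt ih =>
      rw [ih (List.Pairwise.of_cons ha) hb]
      constructor
      · rintro ⟨z, hz1, hz2⟩; exact ⟨z, List.mem_cons_of_mem _ hz1, hz2⟩
      · rintro ⟨z, hz1, hz2⟩
        rcases List.mem_cons.mp hz1 with rfl | hz1'
        · rcases List.mem_cons.mp hz2 with rfl | hz2'
          · exact absurd rfl hne
          · have : y ≤ z := (List.pairwise_cons.mp hb).1 z hz2'
            exact absurd (lt_of_lt_of_le hlt this) (lt_irrefl z)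
        · exact ⟨z, hz1', hz2⟩
  | case5 x xs y ys hne hnlt ih =>
      rw [ih ha (List.Pairwise.of_cons hb)]
      have hyx : y < x := lt_of_le_of_ne (not_lt.mp hnlt) (fun h => hne h.symm)
      constructor
      · rintro ⟨z, hz1, hz2⟩; exact ⟨z, hz1, List.mem_cons_of_mem _ hz2⟩
      · rintro ⟨z, hz1, hz2⟩
        rcases List.mem_cons.mp hz2 with rfl | hz2'
        · rcases List.mem_cons.mp hz1 with rfl | hz1'
          · exact absurd rfl hne
          · have : x ≤ z := (List.pairwise_cons.mp ha).1 z hz1'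
            exact absurd (lt_of_lt_of_le hyx this) (lt_irrefl z)
        · exact ⟨z, hz1, hz2'⟩

theorem pv_B_iff (l1 l2 : List String) :
    matching_elements_2_alt l1 l2 = true ↔ ∃ x, x ∈ l2 ∧ x ∈ l1 := by
  unfold matching_elements_2_alt
  rw [pv_merge_iff _ _ (PySem.List.sorted_pairwise l1 (fun x => x)) (PySem.List.sorted_pairwise l2 (fun x => x))]
  simp only [PySem.List.mem_sorted]
  exact ⟨fun ⟨x, h1, h2⟩ => ⟨x, h2, h1⟩, fun ⟨x, h2, h1⟩ => ⟨x, h1, h2⟩⟩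

-- ===== VERDICT =====
theorem matching_elements_2_spec : Claim_equal_matching_elements_2 := by
  intro l1 l2 _
  unfold Spec_matching_elements_2
  rw [Bool.eq_iff_iff, pv_A_iff, pv_B_iff]
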